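-- pv_equiv track=rewrite | github.com/magnolia0713/algo | 백준/Silver/15666. N과 M （12）/N과 M （12）.py | NM1
-- ===== SOURCE A (Python) =====
-- import copy
--
-- def NM1(N, M, num_list, list_a=None):
--     #for initiate
--     if list_a is None:
--         list_a = copy.deepcopy(num_list)
--         M -= 1
--     for i in range(1, len(list_a)):
--         if list_a[i] == list_a[i-1]:
--             list_a[i-1] = -1
--     list_a = [i for i in list_a if i != -1]
--
--     if M == 0:
--         return list_a
--
--     next_list = []
--     for list_b in list_a:
--         for i in num_list:
--             if i[0] >= list_b[-1]:
--                 next_list.append(list_b + i)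
--
--     for i in range(1, len(next_list)):
--         if next_list[i] == next_list[i-1]:
--             next_list[i-1] = -1
--     next_list = [i for i in next_list if i != -1]
--
--     return NM1(N, M-1, num_list, next_list)
-- ===== SOURCE B (Python) =====
-- import copy
--
-- # Iterative rewrite: while-loop over generations, comprehension-built next level,
-- # zip-based "keep element iff it differs from its successor" dedup.
-- # Return-value equivalence only: A marks a supplied list_a in place with -1; B never mutates it.
-- def NM1(N, M, num_list, list_a=None):
--     if list_a is None:
--         list_a = copy.deepcopy(num_list)
--         M -= 1
--     cur = [x for x, y in zip(list_a, list_a[1:]) if x != y] + list_a[-1:]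
--     while M > 0:
--         nxt = [seq + ext for seq in cur for ext in num_list if ext[0] >= seq[-1]]
--         cur = [x for x, y in zip(nxt, nxt[1:]) if x != y] + nxt[-1:]
--         M -= 1
--     return cur
-- ===== Notes on version B (the rewrite author's own statement) =====
-- stated objective: simpler
-- what changed: Replaced A's tail recursion and its sentinel(-1)-marking adjacent dedup by an iterative while loop over generations with a comprehension-built next level and a zip-based keep-iff-differs-from-successor dedup.
import Mathlib
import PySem

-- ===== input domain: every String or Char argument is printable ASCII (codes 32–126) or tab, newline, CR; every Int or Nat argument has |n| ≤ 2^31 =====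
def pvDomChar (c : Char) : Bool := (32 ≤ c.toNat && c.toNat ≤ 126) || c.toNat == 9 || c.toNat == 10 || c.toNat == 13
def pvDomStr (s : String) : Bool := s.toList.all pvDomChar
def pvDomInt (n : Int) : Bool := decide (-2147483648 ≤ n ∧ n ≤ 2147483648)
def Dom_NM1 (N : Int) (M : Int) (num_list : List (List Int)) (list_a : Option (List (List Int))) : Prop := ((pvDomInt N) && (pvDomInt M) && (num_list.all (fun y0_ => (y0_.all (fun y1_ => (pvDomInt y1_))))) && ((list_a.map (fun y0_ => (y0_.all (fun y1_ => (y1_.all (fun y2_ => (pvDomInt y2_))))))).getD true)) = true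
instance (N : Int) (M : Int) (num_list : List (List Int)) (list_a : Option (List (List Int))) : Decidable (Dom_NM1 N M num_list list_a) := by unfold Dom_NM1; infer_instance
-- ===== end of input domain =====

-- B replaces A's tail recursion and sentinel-marking dedup by an iterative while loop with a
-- zip-based dedup (objective: simpler). Return-value equivalence only: A overwrites entries of a
-- caller-supplied list_a with -1 in place; B never mutates its arguments.

-- ===== PORT A =====
-- A's marking pass: 'for i in range(1, len(a)): if a[i] == a[i-1]: a[i-1] = -1';
-- the sentinel -1 (never equal to a list) is ported as 'none'.
def pvMarkA (xs : List (List Int)) : List (Option (List Int)) :=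
  (List.range' 1 (xs.length - 1)).foldl
    (fun a i => if a.getD i none = a.getD (i - 1) none then a.set (i - 1) none else a)
    (xs.map some)

-- '[i for i in a if i != -1]'
def pvDedupA (xs : List (List Int)) : List (List Int) := (pvMarkA xs).filterMap id

-- A's nested append loops building next_list; 'i[0]' and 'list_b[-1]' are pyGet? with a junk
-- default reached only on empty inner lists, which Pre_ excludes (Python raises IndexError there)
def pvBuildA (num_list la : List (List Int)) : List (List Int) :=
  la.foldl (fun acc lb =>
    num_list.foldl (fun acc i =>
      if (PySem.List.pyGet? lb (-1)).getD 0 ≤ (PySem.List.pyGet? i 0).getD 0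
      then acc ++ [lb ++ i] else acc) acc) []

-- A's recursion; M decreases by 1 each call, reaching the M == 0 exit only from M ≥ 0
-- (for negative M Python never returns; that region is outside Pre_ and the guard only totalizes).
def NM1go (M : Int) (num_list la : List (List Int)) : List (List Int) :=
  let la' := pvDedupA la
  if M = 0 then la'
  else if M < 0 then []
  else NM1go (M - 1) num_list (pvDedupA (pvBuildA num_list la'))
termination_by M.toNat
decreasing_by omega

def NM1 (N : Int) (M : Int) (num_list : List (List Int)) (list_a : Option (List (List Int))) : List (List Int) :=
  match list_a with
  | none => NM1go (M - 1) num_list num_list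
  | some l => NM1go M num_list l

-- ===== PORT B =====
-- '[x for x, y in zip(a, a[1:]) if x != y] + a[-1:]'
def pvDedupB (xs : List (List Int)) : List (List Int) :=
  (((xs.zip (PySem.List.slice xs (some 1) none)).filter (fun p => p.1 ≠ p.2)).map (fun p => p.1))
    ++ PySem.List.slice xs (some (-1)) none

-- '[seq + ext for seq in cur for ext in num_list if ext[0] >= seq[-1]]'
def pvBuildB (num_list cur : List (List Int)) : List (List Int) :=
  cur.flatMap (fun seq =>
    ((num_list.filter (fun ext =>
        (PySem.List.pyGet? seq (-1)).getD 0 ≤ (PySem.List.pyGet? ext 0).getD 0)).map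
      (fun ext => seq ++ ext)))

-- 'while M > 0: …'
def NM1altLoop (M : Int) (num_list cur : List (List Int)) : List (List Int) :=
  if 0 < M then NM1altLoop (M - 1) num_list (pvDedupB (pvBuildB num_list cur)) else cur
termination_by M.toNat
decreasing_by omega

def NM1_alt (N : Int) (M : Int) (num_list : List (List Int)) (list_a : Option (List (List Int))) : List (List Int) :=
  match list_a with
  | none => NM1altLoop (M - 1) num_list (pvDedupB num_list)
  | some l => NM1altLoop M num_list (pvDedupB l)

-- ===== PRECONDITION & SPEC =====
-- Pre_ excludes exactly the inputs on which Python A does not return: M ≤ 0 with list_a = None and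
-- M < 0 with a supplied list_a (the recursion never reaches M == 0 and dies with RecursionError),
-- and empty inner lists reached by i[0] / list_b[-1] when a next generation is built (IndexError).
def Pre_NM1 (N : Int) (M : Int) (num_list : List (List Int)) (list_a : Option (List (List Int))) : Prop :=
  match list_a with
  | none => 1 ≤ M ∧ (M = 1 ∨ (∀ x ∈ num_list, x ≠ []))
  | some l => 0 ≤ M ∧ (M = 0 ∨ l = [] ∨ ((∀ x ∈ l, x ≠ []) ∧ (∀ x ∈ num_list, x ≠ [])))
instance (N : Int) (M : Int) (num_list : List (List Int)) (list_a : Option (List (List Int))) : Decidable (Pre_NM1 N M num_list list_a) := by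
  unfold Pre_NM1; cases list_a <;> infer_instance
def pvWitness_NM1 : Int × Int × List (List Int) × Option (List (List Int)) := (3, 2, [[1], [2]], none)

def Spec_NM1 (N : Int) (M : Int) (num_list : List (List Int)) (list_a : Option (List (List Int))) (out : List (List Int)) : Prop := out = NM1_alt N M num_list list_a
instance (N : Int) (M : Int) (num_list : List (List Int)) (list_a : Option (List (List Int))) (out : List (List Int)) : Decidable (Spec_NM1 N M num_list list_a out) := by unfold Spec_NM1; infer_instance

-- ===== CLAIM (what is proved, stated in full; the proofs are below) =====
def Claim_equal_NM1 : Prop := ∀ (N : Int) (M : Int) (num_list : List (List Int)) (list_a : Option (List (List Int))), Dom_NM1 N M num_list list_a → Pre_NM1 N M num_list list_a → Spec_NM1 N M num_list list_a (NM1 N M num_list list_a)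

-- ===== LEMMAS AND PROOFS =====

-- reference dedup: keep the last element of every run of adjacent equals
def dedupRun : List (List Int) → List (List Int)
  | [] => []
  | [x] => [x]
  | x :: y :: t => if x = y then dedupRun (y :: t) else x :: dedupRun (y :: t)

-- A's marking array, as a structural recursion
def markSpec : List (List Int) → List (Option (List Int))
  | [] => []
  | [x] => [some x]
  | x :: y :: t => (if x = y then none else some x) :: markSpec (y :: t)

theorem markSpec_length (xs : List (List Int)) : (markSpec xs).length = xs.length := by
  induction xs using markSpec.induct <;> simp [markSpec, *]

theorem markSpec_getD (xs : List (List Int)) (j : Nat) (hj : j < xs.length) :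
    (markSpec xs).getD j none =
      if j + 1 < xs.length ∧ xs.getD j [] = xs.getD (j + 1) [] then none
      else some (xs.getD j []) := by
  induction xs using markSpec.induct generalizing j with
  | case1 => simp at hj
  | case2 x =>
    simp at hj
    subst hj
    simp [markSpec]
  | case3 x y t ih =>
    cases j with
    | zero => simp [markSpec]
    | succ j =>
      have hj' : j < (y :: t).length := by simpa using hj
      have := ih j hj'
      simp only [markSpec, List.getD_cons_succ]
      rw [this]
      simp only [List.length_cons, List.getD_cons_succ]
      exact if_congr (and_congr_left' (by omega)) rfl rfl

theorem foldl_mark_length (l : List Nat) (a : List (Option (List Int))) :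
    (l.foldl (fun a i => if a.getD i none = a.getD (i - 1) none then a.set (i - 1) none else a) a).length = a.length := by
  induction l generalizing a with
  | nil => rfl
  | cons i l ih => simp only [List.foldl_cons]; rw [ih]; split <;> simp

theorem markA_partial (xs : List (List Int)) : ∀ (k : Nat), k ≤ xs.length - 1 → ∀ (j : Nat), j < xs.length →
    ((List.range' 1 k).foldl
      (fun a i => if a.getD i none = a.getD (i - 1) none then a.set (i - 1) none else a)
      (xs.map some)).getD j none =
      if j + 1 ≤ k ∧ xs.getD j [] = xs.getD (j + 1) [] then none
      else some (xs.getD j []) := by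
  intro k
  induction k with
  | zero =>
    intro hk j hj
    simp only [List.range'_zero, List.foldl_nil]
    rw [List.getD_eq_getElem _ _ (by simpa using hj), List.getD_eq_getElem _ _ hj]
    simp
  | succ k ih =>
    intro hk j hj
    have hk' : k ≤ xs.length - 1 := by omega
    have hlen : k + 2 ≤ xs.length := by omega
    rw [List.range'_concat, List.foldl_append, List.foldl_cons, List.foldl_nil]
    have h1 : 1 + 1 * k = k + 1 := by ring
    rw [h1]
    have e1 : ((List.range' 1 k).foldl
        (fun a i => if a.getD i none = a.getD (i - 1) none then a.set (i - 1) none else a)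
        (xs.map some)).getD (k + 1) none = some (xs.getD (k + 1) []) := by
      rw [ih hk' (k + 1) (by omega), if_neg]; rintro ⟨h, -⟩; omega
    have e2 : ((List.range' 1 k).foldl
        (fun a i => if a.getD i none = a.getD (i - 1) none then a.set (i - 1) none else a)
        (xs.map some)).getD k none = some (xs.getD k []) := by
      rw [ih hk' k (by omega), if_neg]; rintro ⟨h, -⟩; omega
    rw [show k + 1 - 1 = k from by omega]
    rw [e1, e2]
    simp only [Option.some.injEq]
    by_cases heq : xs.getD (k + 1) [] = xs.getD k []
    · rw [if_pos heq]
      by_cases hjk : j = k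
      · subst hjk
        rw [List.getD_eq_getElem _ _ (by rw [List.length_set, foldl_mark_length]; simpa using hj)]
        rw [List.getElem_set]
        rw [if_pos rfl, if_pos ⟨by omega, heq.symm⟩]
      · rw [List.getD_eq_getElem?_getD, List.getElem?_set]
        rw [if_neg (by omega)]
        rw [← List.getD_eq_getElem?_getD, ih hk' j hj]
        exact if_congr (and_congr_left' (by omega)) rfl rfl
    · rw [if_neg heq]
      rw [ih hk' j hj]
      by_cases hjk : j = k
      · subst hjk
        rw [if_neg (by omega), if_neg ?_]
        intro h
        exact heq h.2.symm
      · exact if_congr (and_congr_left' (by omega)) rfl rfl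

theorem pvMarkA_eq (xs : List (List Int)) : pvMarkA xs = markSpec xs := by
  apply List.ext_getElem
  · rw [markSpec_length]; unfold pvMarkA; rw [foldl_mark_length]; simp
  · intro j h1 h2
    have hj : j < xs.length := by rw [markSpec_length] at h2; exact h2
    have l := markA_partial xs (xs.length - 1) (le_refl _) j hj
    have r := markSpec_getD xs j hj
    unfold pvMarkA at h1 ⊢
    rw [← List.getD_eq_getElem _ none h1, ← List.getD_eq_getElem _ none h2, l, r]
    exact if_congr (and_congr_left' (by omega)) rfl rfl

theorem pvDedupA_eq (xs : List (List Int)) : pvDedupA xs = dedupRun xs := by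
  unfold pvDedupA
  rw [pvMarkA_eq]
  induction xs with
  | nil => rfl
  | cons x xs ih =>
    cases xs with
    | nil => rfl
    | cons y t =>
      simp only [markSpec, dedupRun]
      by_cases h : x = y
      · rw [if_pos h, if_pos h, List.filterMap_cons_none rfl, ih]
      · rw [if_neg h, if_neg h, List.filterMap_cons_some (f := id) (rfl : id (some x) = some x), ih]

theorem pvDedupB_eq (xs : List (List Int)) : pvDedupB xs = dedupRun xs := by
  unfold pvDedupB
  rw [PySem.List.slice_from_one, PySem.List.slice_from_neg_one]
  induction xs with
  | nil => rfl
  | cons x xs ih =>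
    cases xs with
    | nil => simp [dedupRun]
    | cons y t =>
     by_cases h : x = y
     · subst h
       simp only [List.tail_cons, List.zip_cons_cons, List.filter_cons, dedupRun]
       rw [← ih]
       simp
     · simp only [List.tail_cons, List.zip_cons_cons, List.filter_cons, dedupRun, if_neg h]
       rw [← ih]
       have hd : decide (¬ (x, y).1 = (x, y).2) = true := by simpa using h
       simp only [hd]
       simp [List.length_cons]

theorem pvBuild_eq (num_list la : List (List Int)) : pvBuildA num_list la = pvBuildB num_list la := by
  unfold pvBuildA pvBuildB
  have inner : ∀ (lb : List Int) (acc : List (List Int)),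
      num_list.foldl (fun acc i =>
        if (PySem.List.pyGet? lb (-1)).getD 0 ≤ (PySem.List.pyGet? i 0).getD 0
        then acc ++ [lb ++ i] else acc) acc =
      acc ++ ((num_list.filter (fun ext =>
        (PySem.List.pyGet? lb (-1)).getD 0 ≤ (PySem.List.pyGet? ext 0).getD 0)).map
          (fun ext => lb ++ ext)) := by
    intro lb acc
    have h := PySem.List.foldl_append_if
      (fun i => decide ((PySem.List.pyGet? lb (-1)).getD 0 ≤ (PySem.List.pyGet? i 0).getD 0))
      (fun i => lb ++ i) num_list acc
    simpa using h
  calc la.foldl _ [] = [] ++ la.flatMap (fun seq =>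
        ((num_list.filter (fun ext =>
            (PySem.List.pyGet? seq (-1)).getD 0 ≤ (PySem.List.pyGet? ext 0).getD 0)).map
          (fun ext => seq ++ ext))) := by
        rw [← PySem.List.foldl_append_eq_flatMap]
        exact List.foldl_ext _ _ _ (fun acc lb _ => inner lb acc)
    _ = _ := by simp

theorem dedupRun_cons_ex (t : List (List Int)) (x : List Int) :
    ∃ r, dedupRun (x :: t) = x :: r := by
  induction t generalizing x with
  | nil => exact ⟨[], rfl⟩
  | cons y t ih =>
    by_cases h : x = y
    · subst h
      obtain ⟨r, hr⟩ := ih x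
      exact ⟨r, by rw [show dedupRun (x :: x :: t) = dedupRun (x :: t) from by simp [dedupRun], hr]⟩
    · exact ⟨dedupRun (y :: t), by simp [dedupRun, h]⟩

theorem dedupRun_chain (l : List (List Int)) : (dedupRun l).IsChain (· ≠ ·) := by
  induction l with
  | nil => simp [dedupRun]
  | cons x xs ih =>
    cases xs with
    | nil => simp [dedupRun]
    | cons y t =>
      by_cases h : x = y
      · rw [show dedupRun (x :: y :: t) = dedupRun (y :: t) from by simp [dedupRun, h]]
        exact ih
      · rw [show dedupRun (x :: y :: t) = x :: dedupRun (y :: t) from by simp [dedupRun, h]]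
        obtain ⟨r, hr⟩ := dedupRun_cons_ex t y
        rw [hr]
        rw [hr] at ih
        exact List.isChain_cons_cons.mpr ⟨h, ih⟩

theorem dedupRun_of_chain (l : List (List Int)) (h : l.IsChain (· ≠ ·)) : dedupRun l = l := by
  induction l with
  | nil => rfl
  | cons x xs ih =>
    cases xs with
    | nil => rfl
    | cons y t =>
      rw [List.isChain_cons_cons] at h
      rw [show dedupRun (x :: y :: t) = x :: dedupRun (y :: t) from by simp [dedupRun, h.1]]
      rw [ih h.2]

theorem dedupRun_idem (l : List (List Int)) : dedupRun (dedupRun l) = dedupRun l :=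
  dedupRun_of_chain _ (dedupRun_chain l)

theorem go_eq_loop (num_list : List (List Int)) (n : Nat) (la : List (List Int)) :
    NM1go (n : Int) num_list la = NM1altLoop (n : Int) num_list (pvDedupB la) := by
  induction n generalizing la with
  | zero => rw [NM1go, NM1altLoop]; simp [pvDedupA_eq, pvDedupB_eq]
  | succ n ih =>
    rw [NM1go, NM1altLoop]
    have h0 : ((n + 1 : Nat) : Int) ≠ 0 := by omega
    have h1 : ¬ ((n + 1 : Nat) : Int) < 0 := by omega
    have h2 : (0 : Int) < ((n + 1 : Nat) : Int) := by omega
    have h3 : ((n + 1 : Nat) : Int) - 1 = (n : Int) := by omega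
    simp only [h0, h1, h2, h3, if_pos, if_false]
    rw [ih]
    rw [pvBuild_eq, pvDedupA_eq, pvDedupA_eq, pvDedupB_eq, pvDedupB_eq, pvDedupB_eq,
      dedupRun_idem]

-- ===== VERDICT (by name: the statement is the Claim_ definition above) =====
theorem NM1_spec : Claim_equal_NM1 := by
  intro N M num_list list_a _ hpre
  unfold Spec_NM1
  cases list_a with
  | none =>
    obtain ⟨h1, -⟩ := hpre
    have : M - 1 = ((M - 1).toNat : Int) := by omega
    show NM1go (M - 1) num_list num_list = NM1altLoop (M - 1) num_list (pvDedupB num_list)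
    rw [this, go_eq_loop]
  | some l =>
    obtain ⟨h1, -⟩ := hpre
    have : M = (M.toNat : Int) := by omega
    show NM1go M num_list l = NM1altLoop M num_list (pvDedupB l)
    rw [this, go_eq_loop]
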